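-- pv_equiv track=rewrite | github.com/metehkaya/Bilkent-BSc-CS-Projects-and-HWs | Projects/CS425-Fall18-Recomma/Code/kshingle_similarity.py | get_kshingle_similarity_matrix
-- ===== SOURCE A (Python) =====
-- def is_similar(similars, movie_name_1, movie_name_2):
--     return (movie_name_1, movie_name_2) in similars
--
-- def get_kshingle_similarity_matrix(similars, movie_names):
--     similarity_matrix = []
--     for movie1 in movie_names:
--         similarity_row = []
--         for movie2 in movie_names:
--             if is_similar(similars, movie1, movie2):
--                 similarity_row.append(1)
--             else:
--                 similarity_row.append(0)
--         similarity_matrix.append(similarity_row)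
--     return similarity_matrix
-- ===== SOURCE B (Python) =====
-- def get_kshingle_similarity_matrix(similars, movie_names):
--     n = len(movie_names)
--     matrix = [[0] * n for _ in range(n)]
--     for a, b in similars:
--         rows = [i for i, name in enumerate(movie_names) if name == a]
--         cols = [j for j, name in enumerate(movie_names) if name == b]
--         for i in rows:
--             for j in cols:
--                 matrix[i][j] = 1
--     return matrix
-- ===== Notes on version B (the rewrite author's own statement) =====
-- stated objective: faster
-- what changed: Instead of an n*n double loop doing a membership scan of similars for every cell, B pre-fills an n*n zero matrix and makes one pass over similars, setting matrix[i][j]=1 for the positions of the two names (all positions, to stay correct under duplicates).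
import Mathlib
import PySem

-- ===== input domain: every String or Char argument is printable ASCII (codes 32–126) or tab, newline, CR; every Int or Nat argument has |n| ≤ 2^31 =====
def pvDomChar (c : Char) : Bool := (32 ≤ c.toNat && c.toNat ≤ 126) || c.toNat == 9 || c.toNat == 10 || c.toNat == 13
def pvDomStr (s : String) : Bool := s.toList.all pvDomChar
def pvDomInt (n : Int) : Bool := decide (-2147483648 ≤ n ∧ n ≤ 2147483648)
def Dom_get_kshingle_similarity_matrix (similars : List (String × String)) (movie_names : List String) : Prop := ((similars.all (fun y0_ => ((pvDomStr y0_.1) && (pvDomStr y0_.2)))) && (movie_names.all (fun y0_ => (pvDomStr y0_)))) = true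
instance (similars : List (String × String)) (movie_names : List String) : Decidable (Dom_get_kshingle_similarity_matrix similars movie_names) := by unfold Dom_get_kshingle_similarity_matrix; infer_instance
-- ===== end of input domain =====

-- B replaces A's n×n double loop (each cell scanning similars) by a zero-filled n×n matrix
-- plus one pass over similars that sets matrix[i][j]=1 at all positions of the two names.

-- ===== PORT A =====
def is_similar (similars : List (String × String)) (movie_name_1 movie_name_2 : String) : Bool :=
  similars.contains (movie_name_1, movie_name_2)

def get_kshingle_similarity_matrix (similars : List (String × String)) (movie_names : List String) : List (List Int) :=
  movie_names.foldl (fun similarity_matrix movie1 =>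
    similarity_matrix ++ [movie_names.foldl (fun similarity_row movie2 =>
      similarity_row ++ [if is_similar similars movie1 movie2 then (1 : Int) else 0]) []]) []

-- ===== PORT B =====
-- matrix[i][j] = 1 (Python's in-place assignment, indices always in range here)
def pvSetEntry (m : List (List Int)) (i j : Nat) : List (List Int) :=
  m.set i ((m.getD i []).set j 1)

-- [i for i, name in enumerate(movie_names) if name == a]
def pvPositions (movie_names : List String) (a : String) : List Nat :=
  (movie_names.zipIdx.filter (fun p => p.1 == a)).map (·.2)

def get_kshingle_similarity_matrix_alt (similars : List (String × String)) (movie_names : List String) : List (List Int) :=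
  let n := movie_names.length
  similars.foldl (fun matrix ab =>
    let rows := pvPositions movie_names ab.1
    let cols := pvPositions movie_names ab.2
    rows.foldl (fun m i => cols.foldl (fun m j => pvSetEntry m i j) m) matrix)
    (List.replicate n (List.replicate n (0 : Int)))

-- ===== PRECONDITION & SPEC =====
def Spec_get_kshingle_similarity_matrix (similars : List (String × String)) (movie_names : List String) (out : List (List Int)) : Prop := out = get_kshingle_similarity_matrix_alt similars movie_names
instance (similars : List (String × String)) (movie_names : List String) (out : List (List Int)) : Decidable (Spec_get_kshingle_similarity_matrix similars movie_names out) := by unfold Spec_get_kshingle_similarity_matrix; infer_instance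

-- ===== CLAIM (what is proved, stated in full; the proofs are below) =====
def Claim_equal_get_kshingle_similarity_matrix : Prop := ∀ (similars : List (String × String)) (movie_names : List String), Dom_get_kshingle_similarity_matrix similars movie_names → Spec_get_kshingle_similarity_matrix similars movie_names (get_kshingle_similarity_matrix similars movie_names)

-- ===== LEMMAS AND PROOFS =====

-- the (i,j) entry of a matrix, 0/[] out of range
def pvEnt (m : List (List Int)) (i j : Nat) : Int := (m.getD i []).getD j 0

-- n×n shape
def pvShape (n : Nat) (m : List (List Int)) : Prop := m.length = n ∧ ∀ r ∈ m, r.length = n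

theorem pv_mem_positions (movie_names : List String) (a : String) (i : Nat) :
    i ∈ pvPositions movie_names a ↔ ∃ h : i < movie_names.length, movie_names[i] = a := by
  constructor
  · intro h
    simp only [pvPositions, List.mem_map, List.mem_filter] at h
    obtain ⟨p, ⟨hz, he⟩, rfl⟩ := h
    rw [List.mem_zipIdx_iff_getElem?] at hz
    rw [List.getElem?_eq_some_iff] at hz
    obtain ⟨hl, hv⟩ := hz
    exact ⟨hl, by simpa using (beq_iff_eq.mp he ▸ hv)⟩
  · rintro ⟨h, hv⟩
    simp only [pvPositions, List.mem_map, List.mem_filter]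
    refine ⟨(a, i), ⟨?_, by simp⟩, rfl⟩
    rw [List.mem_zipIdx_iff_getElem?]
    simp [h, hv]

theorem pv_shape_setEntry {n : Nat} {m : List (List Int)} (hm : pvShape n m) (i j : Nat) :
    pvShape n (pvSetEntry m i j) := by
  obtain ⟨hl, hr⟩ := hm
  refine ⟨by simpa [pvSetEntry] using hl, ?_⟩
  intro r hrm
  by_cases hi : i < m.length
  · rcases List.mem_or_eq_of_mem_set hrm with h | h
    · exact hr r h
    · subst h
      rw [List.length_set, List.getD_eq_getElem _ _ hi]
      exact hr _ (List.getElem_mem hi)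
  · rw [pvSetEntry, List.set_eq_of_length_le (by omega)] at hrm
    exact hr r hrm

theorem pv_ent_setEntry_self {n : Nat} {m : List (List Int)} (hm : pvShape n m)
    {i j : Nat} (hi : i < n) (hj : j < n) : pvEnt (pvSetEntry m i j) i j = 1 := by
  obtain ⟨hl, hr⟩ := hm
  have him : i < m.length := by omega
  have hrow : (m.getD i []).length = n := by
    rw [List.getD_eq_getElem _ _ him]; exact hr _ (List.getElem_mem him)
  have h1 : (pvSetEntry m i j).getD i [] = (m.getD i []).set j 1 := by
    unfold pvSetEntry
    rw [List.getD_eq_getElem _ _ (by simpa using him)]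
    exact List.getElem_set_self _
  unfold pvEnt
  rw [h1, List.getD_eq_getElem _ _ (by rw [List.length_set, hrow]; exact hj)]
  exact List.getElem_set_self _

theorem pv_ent_setEntry_ne {m : List (List Int)} {i j i' j' : Nat}
    (h : i ≠ i' ∨ j ≠ j') : pvEnt (pvSetEntry m i j) i' j' = pvEnt m i' j' := by
  unfold pvEnt pvSetEntry
  by_cases hii : i = i'
  · subst hii
    have hj' : j ≠ j' := h.resolve_left (by simp)
    by_cases hi : i < m.length
    · have h1 : (m.set i ((m.getD i []).set j 1)).getD i [] = (m.getD i []).set j 1 := by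
        rw [List.getD_eq_getElem _ _ (by simpa using hi)]
        exact List.getElem_set_self _
      rw [h1]
      by_cases hjl : j' < (m.getD i []).length
      · rw [List.getD_eq_getElem _ _ (by simpa using hjl),
          List.getElem_set_ne (by omega), List.getD_eq_getElem _ _ hjl]
      · rw [List.getD_eq_default _ _ (by rw [List.length_set]; omega), List.getD_eq_default _ _ (by omega)]
    · rw [List.set_eq_of_length_le (by omega)]
  · have h1 : (m.set i ((m.getD i []).set j 1)).getD i' [] = m.getD i' [] := by
      simp only [List.getD_eq_getElem?_getD, List.getElem?_set_ne hii]
    rw [h1]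

theorem pv_colfold {n : Nat} (cols : List Nat) (hc : ∀ c ∈ cols, c < n) (i : Nat) (hi : i < n) :
    ∀ m, pvShape n m →
      pvShape n (cols.foldl (fun m j => pvSetEntry m i j) m) ∧
      ∀ i' j', pvEnt (cols.foldl (fun m j => pvSetEntry m i j) m) i' j' =
        if i' = i ∧ j' ∈ cols then 1 else pvEnt m i' j' := by
  induction cols with
  | nil => intro m hm; exact ⟨hm, by simp⟩
  | cons c cs ih =>
    intro m hm
    have hc' : ∀ x ∈ cs, x < n := fun x hx => hc x (by simp [hx])
    have hcn : c < n := hc c (by simp)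
    have hm' := pv_shape_setEntry hm i c
    obtain ⟨hsh, hent⟩ := ih hc' (pvSetEntry m i c) hm'
    refine ⟨by simpa using hsh, ?_⟩
    intro i' j'
    simp only [List.foldl_cons]
    rw [hent i' j']
    by_cases h1 : i' = i ∧ j' ∈ cs
    · simp [h1]
    · rw [if_neg h1]
      by_cases h2 : i' = i ∧ j' = c
      · obtain ⟨rfl, rfl⟩ := h2
        rw [pv_ent_setEntry_self hm hi hcn, if_pos ⟨rfl, by simp⟩]
      · have hne : i ≠ i' ∨ c ≠ j' := by tauto
        rw [pv_ent_setEntry_ne hne, if_neg (by simp at h1 h2 ⊢; tauto)]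

theorem pv_rowfold {n : Nat} (rows cols : List Nat) (hr : ∀ c ∈ rows, c < n)
    (hc : ∀ c ∈ cols, c < n) :
    ∀ m, pvShape n m →
      pvShape n (rows.foldl (fun m i => cols.foldl (fun m j => pvSetEntry m i j) m) m) ∧
      ∀ i' j', pvEnt (rows.foldl (fun m i => cols.foldl (fun m j => pvSetEntry m i j) m) m) i' j' =
        if i' ∈ rows ∧ j' ∈ cols then 1 else pvEnt m i' j' := by
  induction rows with
  | nil => intro m hm; exact ⟨hm, by simp⟩
  | cons r rs ih =>
    intro m hm
    have hr' : ∀ x ∈ rs, x < n := fun x hx => hr x (by simp [hx])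
    have hrn : r < n := hr r (by simp)
    obtain ⟨hsh0, hent0⟩ := pv_colfold cols hc r hrn m hm
    obtain ⟨hsh, hent⟩ := ih hr' _ hsh0
    refine ⟨by simpa using hsh, ?_⟩
    intro i' j'
    simp only [List.foldl_cons]
    rw [hent i' j', hent0 i' j']
    by_cases h1 : i' ∈ rs ∧ j' ∈ cols
    · simp [h1.1, h1.2]
    · rw [if_neg h1]
      by_cases h2 : i' = r ∧ j' ∈ cols
      · simp [h2.1, h2.2]
      · rw [if_neg h2, if_neg (by simp at h1 h2 ⊢; tauto)]

theorem pv_fillfold (movie_names : List String) (s : List (String × String)) :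
    ∀ m, pvShape movie_names.length m →
      pvShape movie_names.length (s.foldl (fun matrix ab =>
        (pvPositions movie_names ab.1).foldl (fun m i =>
          (pvPositions movie_names ab.2).foldl (fun m j => pvSetEntry m i j) m) matrix) m) ∧
      ∀ i' j', i' < movie_names.length → j' < movie_names.length →
        pvEnt (s.foldl (fun matrix ab =>
          (pvPositions movie_names ab.1).foldl (fun m i =>
            (pvPositions movie_names ab.2).foldl (fun m j => pvSetEntry m i j) m) matrix) m) i' j' =
        if (movie_names.getD i' "", movie_names.getD j' "") ∈ s then 1 else pvEnt m i' j' := by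
  induction s with
  | nil => intro m hm; exact ⟨hm, by simp⟩
  | cons ab rest ih =>
    intro m hm
    have hposr : ∀ x ∈ pvPositions movie_names ab.1, x < movie_names.length := by
      intro x hx; exact ((pv_mem_positions _ _ _).mp hx).1
    have hposc : ∀ x ∈ pvPositions movie_names ab.2, x < movie_names.length := by
      intro x hx; exact ((pv_mem_positions _ _ _).mp hx).1
    obtain ⟨hsh0, hent0⟩ := pv_rowfold (n := movie_names.length)
      (pvPositions movie_names ab.1) (pvPositions movie_names ab.2) hposr hposc m hm
    obtain ⟨hsh, hent⟩ := ih _ hsh0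
    refine ⟨by simpa using hsh, ?_⟩
    intro i' j' hi hj
    simp only [List.foldl_cons]
    rw [hent i' j' hi hj, hent0 i' j']
    have hmemr : i' ∈ pvPositions movie_names ab.1 ↔ movie_names.getD i' "" = ab.1 := by
      rw [pv_mem_positions, List.getD_eq_getElem _ _ hi]
      constructor
      · rintro ⟨_, h⟩; exact h
      · intro h; exact ⟨hi, h⟩
    have hmemc : j' ∈ pvPositions movie_names ab.2 ↔ movie_names.getD j' "" = ab.2 := by
      rw [pv_mem_positions, List.getD_eq_getElem _ _ hj]
      constructor
      · rintro ⟨_, h⟩; exact h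
      · intro h; exact ⟨hj, h⟩
    by_cases h1 : (movie_names.getD i' "", movie_names.getD j' "") ∈ rest
    · rw [if_pos h1, if_pos (List.mem_cons_of_mem _ h1)]
    · rw [if_neg h1]
      by_cases h2 : movie_names.getD i' "" = ab.1 ∧ movie_names.getD j' "" = ab.2
      · rw [if_pos ⟨hmemr.mpr h2.1, hmemc.mpr h2.2⟩,
          if_pos (by rw [List.mem_cons]; left; rw [Prod.ext_iff]; exact h2)]
      · have hno : (movie_names.getD i' "", movie_names.getD j' "") ∉ (ab :: rest) := by
          rw [List.mem_cons]
          rintro (h | h)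
          · exact h2 (Prod.ext_iff.mp h)
          · exact h1 h
        rw [if_neg (by rw [hmemr, hmemc]; exact h2), if_neg hno]

theorem pv_foldl_append_map {α β : Type} (l : List α) (f : α → β) (init : List β) :
    l.foldl (fun acc x => acc ++ [f x]) init = init ++ l.map f := by
  induction l generalizing init with
  | nil => simp
  | cons x xs ih => simp [List.foldl, ih]

theorem pv_A_eq_map (similars : List (String × String)) (movie_names : List String) :
    get_kshingle_similarity_matrix similars movie_names =
      movie_names.map (fun m1 => movie_names.map (fun m2 =>
        if (m1, m2) ∈ similars then (1 : Int) else 0)) := by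
  unfold get_kshingle_similarity_matrix
  rw [pv_foldl_append_map]
  simp only [List.nil_append]
  apply List.map_congr_left
  intro m1 _
  rw [pv_foldl_append_map]
  simp only [List.nil_append]
  apply List.map_congr_left
  intro m2 _
  simp [is_similar]

theorem pv_ent_eq_getElem (m : List (List Int)) (i j : Nat)
    (hi : i < m.length) (hj : j < (m[i]'hi).length) : pvEnt m i j = (m[i]'hi)[j]'hj := by
  unfold pvEnt
  rw [List.getD_eq_getElem _ _ hi, List.getD_eq_getElem _ _ hj]

theorem pv_ent_zeros (n i j : Nat) (hi : i < n) (hj : j < n) :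
    pvEnt (List.replicate n (List.replicate n (0 : Int))) i j = 0 := by
  have h1 : (List.replicate n (List.replicate n (0 : Int))).getD i [] = List.replicate n (0 : Int) := by
    rw [List.getD_eq_getElem _ _ (by simpa using hi)]
    exact List.getElem_replicate _
  unfold pvEnt
  rw [h1, List.getD_eq_getElem _ _ (by simpa using hj)]
  exact List.getElem_replicate _

theorem pv_main (similars : List (String × String)) (movie_names : List String) :
    get_kshingle_similarity_matrix similars movie_names =
      get_kshingle_similarity_matrix_alt similars movie_names := by
  have hz : pvShape movie_names.length
      (List.replicate movie_names.length (List.replicate movie_names.length (0 : Int))) := by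
    refine ⟨by simp, ?_⟩
    intro r hr
    rw [List.eq_of_mem_replicate hr]; simp
  obtain ⟨hsh, hent⟩ := pv_fillfold movie_names similars _ hz
  have halt : get_kshingle_similarity_matrix_alt similars movie_names =
      similars.foldl (fun matrix ab =>
        (pvPositions movie_names ab.1).foldl (fun m i =>
          (pvPositions movie_names ab.2).foldl (fun m j => pvSetEntry m i j) m) matrix)
        (List.replicate movie_names.length (List.replicate movie_names.length (0 : Int))) := rfl
  rw [pv_A_eq_map, halt]
  apply List.ext_getElem
  · rw [hsh.1]; simp
  intro i h1 h2
  have hi : i < movie_names.length := by simpa using h1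
  have hrowlen := hsh.2 _ (List.getElem_mem h2)
  apply List.ext_getElem
  · simp [hrowlen]
  intro j h3 h4
  have hj : j < movie_names.length := by simpa using h3
  have hval := hent i j hi hj
  rw [pv_ent_eq_getElem _ i j h2 h4, pv_ent_zeros _ _ _ hi hj,
    List.getD_eq_getElem _ _ hi, List.getD_eq_getElem _ _ hj] at hval
  simp only [List.getElem_map]
  rw [hval]

-- ===== VERDICT (by name: the statement is the Claim_ definition above) =====
theorem get_kshingle_similarity_matrix_spec : Claim_equal_get_kshingle_similarity_matrix := by
  intro similars movie_names _
  exact pv_main similars movie_names
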